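-- pv_equiv track=rewrite | github.com/justaride/hovfaret13-database | scripts/enrich-from-drive.py | find_meeting
-- ===== SOURCE A (Python) =====
-- def find_meeting(meetings, date_str, title_match=None):
--     for m in meetings:
--         if m.get("date") == date_str:
--             if title_match:
--                 if title_match.lower() in m.get("title", "").lower():
--                     return m
--             else:
--                 return m
--     # Fallback - just by date
--     for m in meetings:
--         if m.get("date") == date_str:
--             return m
--     return None
-- ===== SOURCE B (Python) =====
-- def find_meeting(meetings, date_str, title_match=None):
--     needle = title_match.lower() if title_match else None
--     fallback = None
--     for m in meetings:
--         if m.get("date") == date_str: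
--             if needle is None:
--                 return m
--             if needle in m.get("title", "").lower():
--                 return m
--             if fallback is None:
--                 fallback = m
--     return fallback
-- ===== Notes on version B (the rewrite author's own statement) =====
-- stated objective: simpler
-- what changed: Single pass carrying a 'first date match' accumulator and returning immediately on a title hit, instead of A's two full scans of the list; the second scan disappears entirely.
import Mathlib
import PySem

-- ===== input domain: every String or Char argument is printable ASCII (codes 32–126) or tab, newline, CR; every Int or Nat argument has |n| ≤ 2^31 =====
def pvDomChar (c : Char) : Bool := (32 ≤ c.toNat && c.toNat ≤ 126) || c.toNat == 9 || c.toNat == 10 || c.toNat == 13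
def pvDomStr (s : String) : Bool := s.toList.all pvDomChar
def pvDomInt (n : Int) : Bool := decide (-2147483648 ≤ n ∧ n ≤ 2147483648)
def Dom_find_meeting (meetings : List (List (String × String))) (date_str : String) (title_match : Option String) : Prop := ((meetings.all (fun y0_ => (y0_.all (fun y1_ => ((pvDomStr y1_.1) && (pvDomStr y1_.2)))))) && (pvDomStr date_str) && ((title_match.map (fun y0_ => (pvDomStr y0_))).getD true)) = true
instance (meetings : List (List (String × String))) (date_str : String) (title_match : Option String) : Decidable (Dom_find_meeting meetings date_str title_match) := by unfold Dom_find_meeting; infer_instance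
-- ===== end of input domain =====

-- B makes one pass with a first-date-match accumulator (returning early on a title hit), replacing A's two full scans (simpler control: the second scan disappears).


-- ===== PORT A =====
-- ===== PORT A =====
-- first loop of A: first meeting with matching date that also passes the (truthy) title test
def fmLoop1 (meetings : List (List (String × String))) (date_str : String) (title_match : Option String) : Option (List (String × String)) :=
  match meetings with
  | [] => none
  | m :: rest =>
    if (PySem.Dict.mk m).get? "date" = some date_str then
      match title_match with
      | some s =>
        if s ≠ "" then
          if PySem.Str.isIn (PySem.Str.lower s) (PySem.Str.lower ((PySem.Dict.mk m).getD "title" "")) then some m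
          else fmLoop1 rest date_str title_match
        else some m
      | none => some m
    else fmLoop1 rest date_str title_match

-- second loop of A: fallback, first meeting with matching date
def fmFallback (meetings : List (List (String × String))) (date_str : String) : Option (List (String × String)) :=
  match meetings with
  | [] => none
  | m :: rest =>
    if (PySem.Dict.mk m).get? "date" = some date_str then some m
    else fmFallback rest date_str

def find_meeting (meetings : List (List (String × String))) (date_str : String) (title_match : Option String) : Option (List (String × String)) :=
  match fmLoop1 meetings date_str title_match with
  | some m => some m
  | none => fmFallback meetings date_str

-- ===== PORT B =====
-- B's single loop: fallback accumulates the first date-only match; a title hit (or no needle) returns at once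
def fmAltGo (meetings : List (List (String × String))) (date_str : String) (needle : Option String) (fallback : Option (List (String × String))) : Option (List (String × String)) :=
  match meetings with
  | [] => fallback
  | m :: rest =>
    if (PySem.Dict.mk m).get? "date" = some date_str then
      match needle with
      | none => some m
      | some nd =>
        if PySem.Str.isIn nd (PySem.Str.lower ((PySem.Dict.mk m).getD "title" "")) then some m
        else fmAltGo rest date_str needle (if fallback = none then some m else fallback)
    else fmAltGo rest date_str needle fallback

def find_meeting_alt (meetings : List (List (String × String))) (date_str : String) (title_match : Option String) : Option (List (String × String)) :=
  let needle := match title_match with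
    | some s => if s ≠ "" then some (PySem.Str.lower s) else none
    | none => none
  fmAltGo meetings date_str needle none

-- ===== PRECONDITION & SPEC =====
def Spec_find_meeting (meetings : List (List (String × String))) (date_str : String) (title_match : Option String) (out : Option (List (String × String))) : Prop := out = find_meeting_alt meetings date_str title_match
instance (meetings : List (List (String × String))) (date_str : String) (title_match : Option String) (out : Option (List (String × String))) : Decidable (Spec_find_meeting meetings date_str title_match out) := by unfold Spec_find_meeting; infer_instance

-- ===== CLAIM (what is proved, stated in full; the proofs are below) =====
def Claim_equal_find_meeting : Prop := ∀ (meetings : List (List (String × String))) (date_str : String) (title_match : Option String), Dom_find_meeting meetings date_str title_match → Spec_find_meeting meetings date_str title_match (find_meeting meetings date_str title_match)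

-- ===== LEMMAS AND PROOFS =====

-- with no needle, B's loop returns the first date match, else the accumulated fallback
theorem fmAltGo_none (meetings : List (List (String × String))) (date_str : String)
    (fb : Option (List (String × String))) :
    fmAltGo meetings date_str none fb
      = (match fmFallback meetings date_str with
         | some m => some m
         | none => fb) := by
  induction meetings generalizing fb with
  | nil => rfl
  | cons m rest ih =>
      by_cases hd : (PySem.Dict.mk m).get? "date" = some date_str <;>
        simp [fmAltGo, fmFallback, hd, ih]

-- with a needle, B's loop returns the first title hit; failing that, the fallback argument,
-- and failing that the first date match of the rest
theorem fmAltGo_some (meetings : List (List (String × String))) (date_str : String)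
    (s : String) (hs : s ≠ "") (fb : Option (List (String × String))) :
    fmAltGo meetings date_str (some (PySem.Str.lower s)) fb
      = (match fmLoop1 meetings date_str (some s) with
         | some m => some m
         | none =>
           match fb with
           | some f => some f
           | none => fmFallback meetings date_str) := by
  induction meetings generalizing fb with
  | nil => cases fb <;> rfl
  | cons m rest ih =>
      by_cases hd : (PySem.Dict.mk m).get? "date" = some date_str
      · cases htc : PySem.Chars.isIn (PySem.Chars.lower s.toList)
            (PySem.Chars.lower ((PySem.Dict.mk m).getD "title" "").toList)
        · cases fb <;>
          · simp [fmAltGo, fmLoop1, fmFallback, PySem.Str.isIn, PySem.Str.lower, hd, hs, htc]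
            exact ih _
        · simp [fmAltGo, fmLoop1, PySem.Str.isIn, PySem.Str.lower, hd, hs, htc]
      · simp [fmAltGo, fmLoop1, fmFallback, hd, ih]

-- with a falsy title, A's first loop coincides with its fallback loop
theorem fmLoop1_falsy (meetings : List (List (String × String))) (date_str : String)
    (title_match : Option String) (ht : title_match = none ∨ title_match = some "") :
    fmLoop1 meetings date_str title_match = fmFallback meetings date_str := by
  induction meetings with
  | nil => rcases ht with h | h <;> subst h <;> rfl
  | cons m rest ih =>
      rcases ht with h | h <;> subst h <;>
        by_cases hd : (PySem.Dict.mk m).get? "date" = some date_str <;>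
          simp [fmLoop1, fmFallback, hd, ih]

-- ===== VERDICT (by name: the statement is the Claim_ definition above) =====
theorem find_meeting_spec : Claim_equal_find_meeting := by
  intro meetings date_str title_match _
  unfold Spec_find_meeting find_meeting find_meeting_alt
  rcases title_match with _ | s
  · rw [fmAltGo_none, fmLoop1_falsy meetings date_str none (Or.inl rfl)]
    cases fmFallback meetings date_str <;> rfl
  · by_cases hs : s = ""
    · subst hs
      simp only [ne_eq, not_true_eq_false, if_false]
      rw [fmAltGo_none, fmLoop1_falsy meetings date_str (some "") (Or.inr rfl)]
      cases fmFallback meetings date_str <;> rfl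
    · simp only [ne_eq, hs, not_false_eq_true, if_true,
        fmAltGo_some meetings date_str s hs none]
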